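-- pv_equiv track=rewrite | github.com/harmor123/ctf-Crypto-xx.py | ROT家族/ROT18解密.py | rot18_decode
-- ===== SOURCE A (Python) =====
-- def rot18_decode(text: str):
--     result = ''
--     for char in text:
--         if 'a' <= char <= 'z':
--             result += chr((ord(char) - ord('a') + 18) % 26 + ord('a'))
--         elif 'A' <= char <= 'Z':
--             result += chr((ord(char) - ord('A') + 18) % 26 + ord('A'))
--         else:
--             result += char
--     return result
-- ===== SOURCE B (Python) =====
-- _lower = ''.join(chr(ord('a') + i) for i in range(26))
-- _upper = ''.join(chr(ord('A') + i) for i in range(26))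
-- _shifted_lower = ''.join(chr((i + 18) % 26 + ord('a')) for i in range(26))
-- _shifted_upper = ''.join(chr((i + 18) % 26 + ord('A')) for i in range(26))
-- _TABLE = str.maketrans(_lower + _upper, _shifted_lower + _shifted_upper)
--
--
-- def rot18_decode(text: str):
--     return text.translate(_TABLE)
-- ===== Notes on version B (the rewrite author's own statement) =====
-- stated objective: idiomatic
-- what changed: Replaces the per-character loop with if/elif branches and repeated string concatenation by a precomputed str.maketrans translation table covering the 52 letters and a single text.translate call.
import Mathlib
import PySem

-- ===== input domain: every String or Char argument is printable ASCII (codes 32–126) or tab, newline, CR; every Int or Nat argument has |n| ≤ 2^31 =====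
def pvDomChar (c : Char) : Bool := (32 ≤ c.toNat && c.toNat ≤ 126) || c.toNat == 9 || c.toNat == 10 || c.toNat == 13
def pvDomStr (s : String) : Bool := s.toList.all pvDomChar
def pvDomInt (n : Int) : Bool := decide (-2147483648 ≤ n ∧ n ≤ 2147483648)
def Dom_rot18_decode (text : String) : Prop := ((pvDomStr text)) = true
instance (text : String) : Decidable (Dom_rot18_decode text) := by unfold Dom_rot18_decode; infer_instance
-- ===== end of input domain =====

-- B replaces A's per-character if/elif loop by a prebuilt 52-entry translation table and a single translate pass (idiomatic).

-- ===== PORT A =====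
def rot18_decode (text : String) : String :=
  String.ofList (text.toList.foldl
    (fun result char =>
      if 'a' ≤ char ∧ char ≤ 'z' then
        result ++ [Char.ofNat ((char.toNat - 'a'.toNat + 18) % 26 + 'a'.toNat)]
      else if 'A' ≤ char ∧ char ≤ 'Z' then
        result ++ [Char.ofNat ((char.toNat - 'A'.toNat + 18) % 26 + 'A'.toNat)]
      else
        result ++ [char]) [])

-- ===== PORT B =====
-- source/target letter lists and the maketrans table (Dict Char Char), as in Source B
def pvLowerB : List Char := (List.range 26).map (fun i => Char.ofNat ('a'.toNat + i))
def pvUpperB : List Char := (List.range 26).map (fun i => Char.ofNat ('A'.toNat + i))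
def pvShiftedLowerB : List Char := (List.range 26).map (fun i => Char.ofNat ((i + 18) % 26 + 'a'.toNat))
def pvShiftedUpperB : List Char := (List.range 26).map (fun i => Char.ofNat ((i + 18) % 26 + 'A'.toNat))
def pvTableB : PySem.Dict Char Char :=
  PySem.Dict.ofList ((pvLowerB ++ pvUpperB).zip (pvShiftedLowerB ++ pvShiftedUpperB))

-- str.translate: each char is looked up in the table, chars absent from the table pass through
def rot18_decode_alt (text : String) : String :=
  String.ofList (text.toList.map (fun c => pvTableB.getD c c))

-- ===== PRECONDITION & SPEC =====
def Spec_rot18_decode (text : String) (out : String) : Prop := out = rot18_decode_alt text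
instance (text : String) (out : String) : Decidable (Spec_rot18_decode text out) := by unfold Spec_rot18_decode; infer_instance

-- ===== CLAIM (what is proved, stated in full; the proofs are below) =====
def Claim_equal_rot18_decode : Prop := ∀ (text : String), Dom_rot18_decode text → Spec_rot18_decode text (rot18_decode text)

-- ===== LEMMAS AND PROOFS =====
def pvCharA (char : Char) : Char :=
  if 'a' ≤ char ∧ char ≤ 'z' then Char.ofNat ((char.toNat - 'a'.toNat + 18) % 26 + 'a'.toNat)
  else if 'A' ≤ char ∧ char ≤ 'Z' then Char.ofNat ((char.toNat - 'A'.toNat + 18) % 26 + 'A'.toNat)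
  else char

lemma pvFoldA (l : List Char) (acc : List Char) :
    l.foldl (fun result char =>
      if 'a' ≤ char ∧ char ≤ 'z' then
        result ++ [Char.ofNat ((char.toNat - 'a'.toNat + 18) % 26 + 'a'.toNat)]
      else if 'A' ≤ char ∧ char ≤ 'Z' then
        result ++ [Char.ofNat ((char.toNat - 'A'.toNat + 18) % 26 + 'A'.toNat)]
      else
        result ++ [char]) acc = acc ++ l.map pvCharA := by
  induction l generalizing acc with
  | nil => simp
  | cons x xs ih =>
    simp only [List.foldl_cons, List.map_cons, ih]
    have hx : (if 'a' ≤ x ∧ x ≤ 'z' then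
        acc ++ [Char.ofNat ((x.toNat - 'a'.toNat + 18) % 26 + 'a'.toNat)]
      else if 'A' ≤ x ∧ x ≤ 'Z' then
        acc ++ [Char.ofNat ((x.toNat - 'A'.toNat + 18) % 26 + 'A'.toNat)]
      else acc ++ [x]) = acc ++ [pvCharA x] := by
      unfold pvCharA; split_ifs <;> rfl
    rw [hx, List.append_assoc]
    rfl

set_option maxRecDepth 8192 in
lemma pvPointwise (c : Char) (h : c.toNat < 127) : pvCharA c = pvTableB.getD c c := by
  have key : ∀ n, n < 127 →
      pvCharA (Char.ofNat n) = pvTableB.getD (Char.ofNat n) (Char.ofNat n) := by decide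
  rw [← Char.ofNat_toNat c]
  exact key _ h

-- ===== VERDICT (by name: the statement is the Claim_ definition above) =====
set_option maxRecDepth 8192 in
theorem rot18_decode_spec : Claim_equal_rot18_decode := by
  intro text hdom
  show rot18_decode text = rot18_decode_alt text
  unfold rot18_decode rot18_decode_alt
  rw [pvFoldA, List.nil_append]
  congr 1
  apply List.map_congr_left
  intro c hc
  apply pvPointwise
  have : pvDomChar c = true := by
    have := hdom
    unfold Dom_rot18_decode pvDomStr at this
    exact (List.all_eq_true.mp this) c hc
  simp only [pvDomChar, Bool.or_eq_true, Bool.and_eq_true, decide_eq_true_eq, beq_iff_eq] at this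
  omega
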